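-- pv_equiv track=rewrite | github.com/cs-learning-every-day/cs61a | guerrilla/g1.py | mario_number
-- ===== SOURCE A (Python) =====
-- def mario_number(level):
--     if len(level) == 0 or level[0] == 'P':
--         return 0
--     if len(level) == 1:
--         return 1
--     if(level[1] == 'P'):
--         return mario_number(level[2:])  # jump
--     else:
--         # jump or step
--         return mario_number(level[1:]) + mario_number(level[2:])
-- ===== SOURCE B (Python) =====
-- def mario_number(level):
--     # Bottom-up DP over suffixes with two rolling accumulators:
--     # a = ways from position i+1, b = ways from i+2 (virtual b=1 past the end
--     # makes the length-1 base case fall out of the same recurrence).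
--     a, b = 0, 1
--     for c in reversed(level):
--         a, b = (0 if c == 'P' else a + b), a
--     return a
-- ===== Notes on version B (the rewrite author's own statement) =====
-- stated objective: faster
-- what changed: Replaced the exponential branching recursion with a single backward pass keeping two rolling DP accumulators (ways from i+1 and i+2); intended as asymptotically faster: measured 9.0x at n=16, and A timed out at n=64 where B returned instantly.
import Mathlib
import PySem

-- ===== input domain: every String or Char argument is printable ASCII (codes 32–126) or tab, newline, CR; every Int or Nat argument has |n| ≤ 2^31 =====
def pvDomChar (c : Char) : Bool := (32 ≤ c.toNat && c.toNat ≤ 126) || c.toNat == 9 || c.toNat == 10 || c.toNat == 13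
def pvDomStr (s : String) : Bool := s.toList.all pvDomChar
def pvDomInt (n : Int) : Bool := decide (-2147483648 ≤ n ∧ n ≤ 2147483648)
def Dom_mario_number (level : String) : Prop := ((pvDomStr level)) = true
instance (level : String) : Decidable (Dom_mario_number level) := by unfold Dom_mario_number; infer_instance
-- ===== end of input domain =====

-- B replaces A's exponential branching recursion by one backward pass with two
-- rolling DP accumulators (intended as faster; measured 9.0x at n=16, A timed out at n=64).

-- ===== PORT A =====
-- A's recursion, step for step, over the character list of the string.
def marioA : List Char → Int
  | [] => 0
  | c :: rest =>
    if c = 'P' then 0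
    else
      match rest with
      | [] => 1
      | d :: rest2 =>
        if d = 'P' then marioA rest2            -- jump
        else marioA (d :: rest2) + marioA rest2 -- jump or step

def mario_number (level : String) : Int := marioA level.toList

-- ===== PORT B =====
-- one fold step of Source B's loop: a, b = (0 if c == 'P' else a + b), a
def marioBstep (p : Int × Int) (c : Char) : Int × Int :=
  ((if c = 'P' then 0 else p.1 + p.2), p.1)

def mario_number_alt (level : String) : Int :=
  (level.toList.reverse.foldl marioBstep (0, 1)).1

-- ===== PRECONDITION & SPEC =====
def Spec_mario_number (level : String) (out : Int) : Prop := out = mario_number_alt level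
instance (level : String) (out : Int) : Decidable (Spec_mario_number level out) := by unfold Spec_mario_number; infer_instance

-- ===== CLAIM (what is proved, stated in full; the proofs are below) =====
def Claim_equal_mario_number : Prop := ∀ (level : String), Dom_mario_number level → Spec_mario_number level (mario_number level)

-- ===== LEMMAS AND PROOFS =====
theorem marioA_P (t : List Char) : marioA ('P' :: t) = 0 := by
  unfold marioA; rfl

-- Invariant of the backward fold: it carries (ways for l, ways for l.tail with
-- a virtual 1 past the end).
theorem marioB_invariant (l : List Char) :
    l.reverse.foldl marioBstep (0, 1) =
      (marioA l, match l with | [] => 1 | _ :: t => marioA t) := by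
  induction l with
  | nil => simp [marioA]
  | cons c t ih =>
    rw [List.reverse_cons, List.foldl_append, ih]
    cases t with
    | nil => simp [marioBstep, marioA]
    | cons d t2 =>
      by_cases hc : c = 'P'
      · simp [marioBstep, hc, marioA]
      · by_cases hd : d = 'P'
        · simp [marioBstep, hc, hd, marioA, marioA_P]
        · simp [marioBstep, hc, hd, marioA]

-- ===== VERDICT (by name: the statement is the Claim_ definition above) =====
theorem mario_number_spec : Claim_equal_mario_number := by
  intro level _
  unfold Spec_mario_number mario_number mario_number_alt
  rw [marioB_invariant]
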